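-- pv_equiv track=rewrite | github.com/itsolutionscorp/AutoStyle-Clustering | python_data/hw4/submissions/untarred3/30.py | make_deductions
-- ===== SOURCE A (Python) =====
-- def make_deductions(possible_subsets, letters):
--     """Infers which letters must be in the word to be guessed, and
--     which letters must not be in the word.
--     A letter must be in the word if it is in every possible subset.
--     A letter is not in the word if it is not in any possible subset.
--
--     >>> letters = ['a', 'b', 'c', 'd', 'e', 'f']
--     >>> subsets = [['a', 'b', 'c'], ['b', 'a', 'e'], ['e', 'a', 'c']]
--     >>> present, not_present = make_deductions(subsets, letters)
--     >>> present
--     ['a']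
--     >>> not_present
--     ['d', 'f']
--     """
--     "*** YOUR CODE HERE ***"
--
--     ingoal_lst = []
--     not_ingoal_lst = []
--     present = []
--     not_present = []
--     for letter in letters:
--         for subset in possible_subsets:
--             if letter not in subset:
--                 not_ingoal_lst.append(letter)
--             if letter in subset:
--                 ingoal_lst.append(letter)
--         if ingoal_lst.count(letter) == len(possible_subsets):
--             present.append(letter)
--         if not_ingoal_lst.count(letter) == len(possible_subsets):
--             not_present.append(letter)
--     return present, not_present
-- ===== SOURCE B (Python) =====
-- def make_deductions(possible_subsets, letters):
--     union = set()
--     inter = None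
--     for subset in possible_subsets:
--         s = set(subset)
--         union |= s
--         inter = s if inter is None else inter & s
--     if inter is None:
--         # intersection over an empty family: no evidence against any letter
--         inter = set(letters)
--     present = [l for l in letters if l in inter]
--     not_present = [l for l in letters if l not in union]
--     return present, not_present
-- ===== Notes on version B (the rewrite author's own statement) =====
-- stated objective: alternative
-- what changed: B precomputes the intersection and the union of all subsets in one pass over the subsets (as sets) and then decides each letter by two membership tests, instead of A's per-letter scan of every subset plus counting over occurrence lists that keep growing across letters; the set machinery costs more on tiny inputs, so no speed is claimed.
-- outside the precondition, e.g. on make_deductions([['a']], ['a', 'a']): A returns (['a'], []), B returns (['a', 'a'], [])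
import Mathlib
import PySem

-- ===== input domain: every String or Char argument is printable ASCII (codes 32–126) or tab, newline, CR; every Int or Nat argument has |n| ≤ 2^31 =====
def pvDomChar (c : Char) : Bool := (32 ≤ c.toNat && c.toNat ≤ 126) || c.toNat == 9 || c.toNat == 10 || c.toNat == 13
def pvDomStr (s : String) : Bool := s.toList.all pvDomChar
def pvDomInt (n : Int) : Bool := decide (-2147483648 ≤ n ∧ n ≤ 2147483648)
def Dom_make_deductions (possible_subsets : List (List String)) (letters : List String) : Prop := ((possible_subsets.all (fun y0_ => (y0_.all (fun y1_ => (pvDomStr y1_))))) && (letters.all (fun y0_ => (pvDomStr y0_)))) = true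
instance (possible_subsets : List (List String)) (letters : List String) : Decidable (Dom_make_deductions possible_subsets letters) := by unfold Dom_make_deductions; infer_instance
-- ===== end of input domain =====

-- B replaces A's per-letter scans (and counts over occurrence lists accumulated across
-- iterations) with one pass over the subsets building an intersection set and a union set,
-- then a membership test per letter (objective: alternative).

-- ===== PORT A =====
-- inner loop of A: 'for subset in possible_subsets: …' appending to not_ingoal_lst / ingoal_lst
def mdInner (possible_subsets : List (List String)) (letter : String)
    (st : List String × List String) : List String × List String :=
  possible_subsets.foldl (fun st subset =>
    let ni := if !(subset.contains letter) then st.2 ++ [letter] else st.2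
    let ing := if subset.contains letter then st.1 ++ [letter] else st.1
    (ing, ni)) st

-- body of A's outer loop (one letter: run the inner loop, then the two count checks)
def mdBody (possible_subsets : List (List String))
    (st : List String × List String × List String × List String) (letter : String) :
    List String × List String × List String × List String :=
  let p := mdInner possible_subsets letter (st.1, st.2.1)
  let pres := if p.1.count letter = possible_subsets.length then st.2.2.1 ++ [letter] else st.2.2.1
  let npres := if p.2.count letter = possible_subsets.length then st.2.2.2 ++ [letter] else st.2.2.2
  (p.1, p.2, pres, npres)

def make_deductions (possible_subsets : List (List String)) (letters : List String) : List String × List String :=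
  let st := letters.foldl (mdBody possible_subsets) ([], [], [], [])
  (st.2.2.1, st.2.2.2)

-- ===== PORT B =====
-- B's loop body over the subsets: union |= set(subset); inter = set(subset) or inter & set(subset)
def mdStep (st : PySem.Set String × Option (PySem.Set String)) (subset : List String) :
    PySem.Set String × Option (PySem.Set String) :=
  let s := PySem.Set.ofList subset
  (PySem.Set.union st.1 s,
   some (match st.2 with
         | none => s
         | some i => PySem.Set.inter i s))

def make_deductions_alt (possible_subsets : List (List String)) (letters : List String) : List String × List String :=
  let st := possible_subsets.foldl mdStep (PySem.Set.empty, none)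
  let inter := match st.2 with
    | none => PySem.Set.ofList letters
    | some i => i
  (letters.filter (fun l => PySem.Set.contains inter l),
   letters.filter (fun l => !(PySem.Set.contains st.1 l)))

-- ===== PRECONDITION & SPEC =====
-- Pre_ excludes letters lists with duplicate entries (when there is at least one subset), a
-- degenerate corner on which neither output is specified: A's count over occurrence lists
-- accumulated across iterations makes a letter's verdict depend on its occurrence index,
-- while B judges every occurrence alike.
def Pre_make_deductions (possible_subsets : List (List String)) (letters : List String) : Prop :=
  letters.Nodup ∨ possible_subsets = []
instance (possible_subsets : List (List String)) (letters : List String) : Decidable (Pre_make_deductions possible_subsets letters) := by unfold Pre_make_deductions; infer_instance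

def pvWitness_make_deductions : List (List String) × List String :=
  ([["a", "b", "c"], ["b", "a", "e"], ["e", "a", "c"]], ["a", "b", "c", "d", "e", "f"])

def Spec_make_deductions (possible_subsets : List (List String)) (letters : List String) (out : List String × List String) : Prop := out = make_deductions_alt possible_subsets letters
instance (possible_subsets : List (List String)) (letters : List String) (out : List String × List String) : Decidable (Spec_make_deductions possible_subsets letters out) := by unfold Spec_make_deductions; infer_instance

-- ===== CLAIM (what is proved, stated in full; the proofs are below) =====
def Claim_equal_make_deductions : Prop := ∀ (possible_subsets : List (List String)) (letters : List String), Dom_make_deductions possible_subsets letters → Pre_make_deductions possible_subsets letters → Spec_make_deductions possible_subsets letters (make_deductions possible_subsets letters)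

-- ===== LEMMAS AND PROOFS =====

-- A's inner loop appends exactly one copy of the letter per subset, to one of the two lists
theorem mdInner_eq (subs : List (List String)) (letter : String) (ing ni : List String) :
    mdInner subs letter (ing, ni) =
      (ing ++ List.replicate (subs.countP (fun s => s.contains letter)) letter,
       ni ++ List.replicate (subs.countP (fun s => !(s.contains letter))) letter) := by
  induction subs generalizing ing ni with
  | nil => simp [mdInner]
  | cons s rest ih =>
    unfold mdInner at ih ⊢
    rw [List.foldl_cons]
    cases hc : s.contains letter with
    | true =>
      have hm : letter ∈ s := by simpa using hc
      simp only [hc, Bool.not_true, reduceIte]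
      rw [ih]
      simp [List.countP_cons, hm, List.replicate_succ]
    | false =>
      have hm : letter ∉ s := by simpa using hc
      simp only [hc, Bool.not_false, reduceIte]
      rw [ih]
      simp [List.countP_cons, hm, List.replicate_succ]

-- first component of B's fold: the union of the subsets seen so far
theorem mdUnion_mem (subs : List (List String)) (u : PySem.Set String)
    (o : Option (PySem.Set String)) (x : String) :
    x ∈ (subs.foldl mdStep (u, o)).1 ↔ x ∈ u ∨ ∃ s ∈ subs, x ∈ s := by
  induction subs generalizing u o with
  | nil => simp
  | cons s rest ih =>
    rw [List.foldl_cons]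
    simp only [mdStep]
    rw [ih]
    simp [PySem.Set.mem_union, PySem.Set.mem_ofList]
    tauto

-- second component of B's fold, once it is `some`
theorem mdInter_some (rest : List (List String)) (u i : PySem.Set String) (x : String) :
    ∃ j, (rest.foldl mdStep (u, some i)).2 = some j ∧
      (x ∈ j ↔ x ∈ i ∧ ∀ s ∈ rest, x ∈ s) := by
  induction rest generalizing u i with
  | nil => exact ⟨i, rfl, by simp⟩
  | cons s rest ih =>
    rw [List.foldl_cons]
    simp only [mdStep]
    obtain ⟨j, hj, hmem⟩ := ih (PySem.Set.union u (PySem.Set.ofList s)) (PySem.Set.inter i (PySem.Set.ofList s))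
    refine ⟨j, hj, ?_⟩
    rw [hmem]
    simp [PySem.Set.mem_inter, PySem.Set.mem_ofList]
    tauto

-- splitting one filter step off A's if-append (used twice in mdOuter)
theorem mdAppendIf {α : Type} (P : Prop) [Decidable P] (pres : List α) (l : α) (F : List α) :
    (if P then pres ++ [l] else pres) ++ F = pres ++ (if decide P = true then l :: F else F) := by
  by_cases h : P <;> simp [h]

-- A's outer loop, for letters not occurring in the accumulated lists
theorem mdOuter (subs : List (List String)) (letters : List String)
    (hnd : letters.Nodup)
    (ing ni pres npres : List String)
    (hing : ∀ l ∈ letters, ing.count l = 0) (hni : ∀ l ∈ letters, ni.count l = 0) :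
    (letters.foldl (mdBody subs) (ing, ni, pres, npres)).2.2 =
    (pres ++ letters.filter (fun l => subs.countP (fun s => s.contains l) = subs.length),
     npres ++ letters.filter (fun l => subs.countP (fun s => !(s.contains l)) = subs.length)) := by
  induction letters generalizing ing ni pres npres with
  | nil => simp
  | cons l rest ih =>
    have hl : l ∉ rest := (List.nodup_cons.mp hnd).1
    have hingl : ing.count l = 0 := hing l (List.mem_cons_self)
    have hnil : ni.count l = 0 := hni l (List.mem_cons_self)
    have hb : mdBody subs (ing, ni, pres, npres) l =
        (ing ++ List.replicate (subs.countP (fun s => s.contains l)) l,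
         ni ++ List.replicate (subs.countP (fun s => !(s.contains l))) l,
         if subs.countP (fun s => s.contains l) = subs.length then pres ++ [l] else pres,
         if subs.countP (fun s => !(s.contains l)) = subs.length then npres ++ [l] else npres) := by
      simp only [mdBody, mdInner_eq]
      rw [show (ing ++ List.replicate (subs.countP (fun s => s.contains l)) l).count l
            = subs.countP (fun s => s.contains l) by
          simp [List.count_append, hingl]]
      rw [show (ni ++ List.replicate (subs.countP (fun s => !(s.contains l))) l).count l
            = subs.countP (fun s => !(s.contains l)) by
          simp [List.count_append, hnil]]
    rw [List.foldl_cons, hb,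
      ih ((List.nodup_cons.mp hnd).2) _ _ _ _
      (fun l' hl' => by
        have hne : (l == l') = false := by
          simp only [beq_eq_false_iff_ne]; rintro rfl; exact hl hl'
        simp [List.count_append, hing l' (List.mem_cons_of_mem _ hl'), List.count_replicate, hne])
      (fun l' hl' => by
        have hne : (l == l') = false := by
          simp only [beq_eq_false_iff_ne]; rintro rfl; exact hl hl'
        simp [List.count_append, hni l' (List.mem_cons_of_mem _ hl'), List.count_replicate, hne])]
    rw [List.filter_cons, List.filter_cons]
    simp only [Prod.mk.injEq]
    constructor <;> apply mdAppendIf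

-- A's outer loop when there are no subsets: every occurrence of every letter is kept twice
theorem mdOuterNil (letters pres npres : List String) :
    (letters.foldl (mdBody []) ([], [], pres, npres)).2.2 = (pres ++ letters, npres ++ letters) := by
  induction letters generalizing pres npres with
  | nil => simp
  | cons l rest ih =>
    rw [List.foldl_cons,
      show mdBody [] ([], [], pres, npres) l = ([], [], pres ++ [l], npres ++ [l]) by
        simp [mdBody, mdInner], ih]
    simp

-- ===== VERDICT (by name: the statement is the Claim_ definition above) =====
theorem make_deductions_spec : Claim_equal_make_deductions := by
  intro subs letters _ hpre
  simp only [Spec_make_deductions, make_deductions, make_deductions_alt]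
  cases subs with
  | nil =>
    rw [mdOuterNil letters [] []]
    simp only [List.nil_append, List.foldl_nil, Prod.mk.injEq]
    refine ⟨?_, ?_⟩
    · refine (List.filter_eq_self.mpr ?_).symm
      intro l hl
      simp [PySem.Set.contains_iff, PySem.Set.mem_ofList, hl]
    · refine (List.filter_eq_self.mpr ?_).symm
      intro l hl
      simp [PySem.Set.empty]
  | cons s rest =>
    have hnd : letters.Nodup := hpre.resolve_right (List.cons_ne_nil s rest)
    rw [mdOuter (s :: rest) letters hnd [] [] [] [] (by simp) (by simp)]
    simp only [List.nil_append]
    rw [List.foldl_cons]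
    simp only [mdStep]
    rw [show (PySem.Set.empty : PySem.Set String) = [] from rfl]
    simp only [Prod.mk.injEq]
    refine ⟨?_, ?_⟩
    · refine List.filter_congr fun l hl => ?_
      obtain ⟨j, hj, hmem⟩ := mdInter_some rest
        (PySem.Set.union [] (PySem.Set.ofList s)) (PySem.Set.ofList s) l
      rw [hj]
      apply Bool.eq_iff_iff.mpr
      rw [decide_eq_true_eq, PySem.Set.contains_iff, hmem, List.countP_eq_length]
      simp only [List.contains_iff_mem, List.mem_cons, PySem.Set.mem_ofList]
      constructor
      · intro h
        exact ⟨h s (Or.inl rfl), fun t ht => h t (Or.inr ht)⟩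
      · rintro ⟨h1, h2⟩ t (rfl | ht')
        · exact h1
        · exact h2 t ht'
    · refine List.filter_congr fun l hl => ?_
      have hu := mdUnion_mem rest (PySem.Set.union [] (PySem.Set.ofList s))
        (some (PySem.Set.ofList s)) l
      simp only [PySem.Set.mem_union, PySem.Set.mem_ofList,
        List.not_mem_nil, false_or] at hu
      apply Bool.eq_iff_iff.mpr
      rw [decide_eq_true_eq, List.countP_eq_length]
      constructor
      · intro h
        have hnot : l ∉ (rest.foldl mdStep
            (PySem.Set.union [] (PySem.Set.ofList s), some (PySem.Set.ofList s))).1 := by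
          rw [hu]
          rintro (h1 | ⟨t, ht, hlt⟩)
          · have hs := h s (List.mem_cons_self)
            simp only [Bool.not_eq_true', List.contains_eq_mem, decide_eq_false_iff_not] at hs
            exact hs h1
          · have hs := h t (List.mem_cons_of_mem _ ht)
            simp only [Bool.not_eq_true', List.contains_eq_mem, decide_eq_false_iff_not] at hs
            exact hs hlt
        simp [PySem.Set.contains_eq_listContains, List.contains_eq_mem, hnot]
      · intro h t ht
        have hnot : l ∉ (rest.foldl mdStep
            (PySem.Set.union [] (PySem.Set.ofList s), some (PySem.Set.ofList s))).1 := by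
          simp only [PySem.Set.contains_eq_listContains, List.contains_eq_mem,
            Bool.not_eq_true', decide_eq_false_iff_not] at h
          exact h
        rw [hu] at hnot
        simp only [Bool.not_eq_true', List.contains_eq_mem, decide_eq_false_iff_not]
        intro hlt
        rcases List.mem_cons.mp ht with rfl | ht'
        · exact hnot (Or.inl hlt)
        · exact hnot (Or.inr ⟨t, ht', hlt⟩)
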